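-- pv_equiv track=rewrite | github.com/Curtain-Quietism/BLCU- | Analyse.py | _parse_birthday_data
-- ===== SOURCE A (Python) =====
-- from collections import defaultdict
-- from typing import Dict, List, Any, Tuple, cast
--
-- def _parse_birthday_data(birthday_list: List) -> Tuple[Dict, Dict]:
--     """Parses the nested birthday list into year and month counts."""
--     years_count = defaultdict(int)
--     months_count = defaultdict(int)
--     for year_map in birthday_list:
--         for year_label, month_list in year_map.items():
--             year_sum = 0
--             for month_entry in month_list:
--                 for month_label, count in month_entry.items():
--                     try:
--                         month_num = int(str(month_label).replace("月", ""))
--                         months_count[month_num] += int(count)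
--                         year_sum += int(count)
--                     except (ValueError, TypeError):
--                         continue
--             years_count[year_label] += year_sum
--     return dict(years_count), dict(months_count)
-- ===== SOURCE B (Python) =====
-- def _parse_birthday_data(birthday_list):
--     """Two-phase rewrite: first flatten into (year_label, month_num, count)
--     triples plus the list of year labels seen, then aggregate each dict in
--     its own simple pass."""
--     labels = []
--     triples = []
--     for year_map in birthday_list:
--         for year_label, month_list in year_map.items():
--             labels.append(year_label)
--             for month_entry in month_list:
--                 for month_label, count in month_entry.items():
--                     try:
--                         month_num = int(str(month_label).replace("月", ""))
--                         triples.append((year_label, month_num, int(count)))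
--                     except (ValueError, TypeError):
--                         continue
--     months_count = {}
--     for _, m, c in triples:
--         months_count[m] = months_count.get(m, 0) + c
--     years_count = {}
--     for lab in labels:
--         years_count.setdefault(lab, 0)
--     for lab, _, c in triples:
--         years_count[lab] += c
--     return years_count, months_count
-- ===== Notes on version B (the rewrite author's own statement) =====
-- stated objective: alternative
-- what changed: Replaces A's inline defaultdict aggregation with a two-phase pipeline: one pass flattens the nested data into (year_label, month_num, count) triples plus the label sequence, then each plain dict is built in its own simple summing pass (labels seeded with 0 first to keep A's zero-valued year entries).
import Mathlib
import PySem

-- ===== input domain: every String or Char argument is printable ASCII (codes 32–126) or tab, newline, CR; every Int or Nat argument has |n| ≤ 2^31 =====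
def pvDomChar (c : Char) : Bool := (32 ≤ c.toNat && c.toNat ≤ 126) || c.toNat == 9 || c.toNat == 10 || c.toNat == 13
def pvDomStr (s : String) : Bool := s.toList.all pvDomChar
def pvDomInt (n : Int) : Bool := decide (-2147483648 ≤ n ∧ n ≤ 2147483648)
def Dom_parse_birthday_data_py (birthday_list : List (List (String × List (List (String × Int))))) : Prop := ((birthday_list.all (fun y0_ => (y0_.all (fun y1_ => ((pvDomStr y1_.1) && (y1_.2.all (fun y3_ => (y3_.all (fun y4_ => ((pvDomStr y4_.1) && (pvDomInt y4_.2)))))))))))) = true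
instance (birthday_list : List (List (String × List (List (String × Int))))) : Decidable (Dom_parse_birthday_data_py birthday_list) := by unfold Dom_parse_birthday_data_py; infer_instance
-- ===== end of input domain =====

-- B replaces A's inline defaultdict aggregation with a two-phase pipeline (flatten to
-- (label, month, count) triples plus the label list, then one simple summing pass per
-- dict); same cost, different decomposition.

-- ===== PORT A =====
def parse_birthday_data_py (birthday_list : List (List (String × List (List (String × Int))))) : (List (String × Int)) × (List (Int × Int)) :=
  let st := birthday_list.foldl (fun st year_map =>
      year_map.foldl (fun st p =>
          let inner := p.2.foldl (fun q me =>
              me.foldl (fun q r =>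
                  match PySem.Int.ofStr? (PySem.Str.replace r.1 "月" "") with
                  | some m => (q.1.modify m 0 (· + r.2), q.2 + r.2)
                  | none => q) q) (st.2, (0 : Int))
          (st.1.modify p.1 0 (· + inner.2), inner.1)) st)
    ((PySem.Dict.empty : PySem.Dict String Int), (PySem.Dict.empty : PySem.Dict Int Int))
  (st.1.items, st.2.items)

-- ===== PORT B =====
def parse_birthday_data_py_alt (birthday_list : List (List (String × List (List (String × Int))))) : (List (String × Int)) × (List (Int × Int)) :=
  let acc := birthday_list.foldl (fun acc year_map =>
      year_map.foldl (fun acc p =>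
          let triples := p.2.foldl (fun ts me =>
              me.foldl (fun ts r =>
                  match PySem.Int.ofStr? (PySem.Str.replace r.1 "月" "") with
                  | some m => ts ++ [(p.1, (m, r.2))]
                  | none => ts) ts) acc.2
          (acc.1 ++ [p.1], triples)) acc)
    (([] : List String), ([] : List (String × Int × Int)))
  let months := acc.2.foldl (fun d t => d.insert t.2.1 (d.getD t.2.1 0 + t.2.2)) (PySem.Dict.empty : PySem.Dict Int Int)
  let years0 := acc.1.foldl (fun d l => d.setdefault l 0) (PySem.Dict.empty : PySem.Dict String Int)
  -- Python B's `years_count[lab] += c` never raises (lab was seeded above), so getD is exact here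
  let years := acc.2.foldl (fun d t => d.insert t.1 (d.getD t.1 0 + t.2.2)) years0
  (years.items, months.items)

-- ===== PRECONDITION & SPEC =====
def Spec_parse_birthday_data_py (birthday_list : List (List (String × List (List (String × Int))))) (out : (List (String × Int)) × (List (Int × Int))) : Prop := out = parse_birthday_data_py_alt birthday_list
instance (birthday_list : List (List (String × List (List (String × Int))))) (out : (List (String × Int)) × (List (Int × Int))) : Decidable (Spec_parse_birthday_data_py birthday_list out) := by unfold Spec_parse_birthday_data_py; infer_instance

-- ===== CLAIM (what is proved, stated in full; the proofs are below) =====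
def Claim_equal_parse_birthday_data_py : Prop := ∀ (birthday_list : List (List (String × List (List (String × Int))))), Dom_parse_birthday_data_py birthday_list → Spec_parse_birthday_data_py birthday_list (parse_birthday_data_py birthday_list)

-- ===== LEMMAS AND PROOFS =====

-- month-entry parse: `int(str(label).replace("月",""))` paired with its count; none = ValueError
def pvParse1 (r : String × Int) : Option (Int × Int) :=
  (PySem.Int.ofStr? (PySem.Str.replace r.1 "月" "")).map (fun m => (m, r.2))

-- all parsed (month, count) pairs of one month_list
def pvTs (ml : List (List (String × Int))) : List (Int × Int) :=
  ml.flatMap (fun me => me.filterMap pvParse1)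

def pvSumc (ts : List (Int × Int)) : Int := (ts.map (·.2)).sum

def pvTag (yl : String) (ts : List (Int × Int)) : List (String × Int × Int) :=
  ts.map (fun t => (yl, t))

def pvAddM (M : PySem.Dict Int Int) (ts : List (Int × Int)) : PySem.Dict Int Int :=
  ts.foldl (fun d t => d.insert t.1 (d.getD t.1 0 + t.2)) M

def pvAddY (D : PySem.Dict String Int) (ts : List (String × Int × Int)) : PySem.Dict String Int :=
  ts.foldl (fun d t => d.insert t.1 (d.getD t.1 0 + t.2.2)) D

def pvSeed (D : PySem.Dict String Int) (L : List String) : PySem.Dict String Int :=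
  L.foldl (fun d l => d.setdefault l 0) D

-- A's per-(year_label, month_list) step
def pvAStep (st : PySem.Dict String Int × PySem.Dict Int Int)
    (p : String × List (List (String × Int))) : PySem.Dict String Int × PySem.Dict Int Int :=
  let inner := p.2.foldl (fun q me =>
      me.foldl (fun q r =>
          match PySem.Int.ofStr? (PySem.Str.replace r.1 "月" "") with
          | some m => (q.1.modify m 0 (· + r.2), q.2 + r.2)
          | none => q) q) (st.2, (0 : Int))
  (st.1.modify p.1 0 (· + inner.2), inner.1)

lemma pvInner1 (me : List (String × Int)) :
    ∀ (q : PySem.Dict Int Int × Int),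
      me.foldl (fun q r =>
          match PySem.Int.ofStr? (PySem.Str.replace r.1 "月" "") with
          | some m => (q.1.modify m 0 (· + r.2), q.2 + r.2)
          | none => q) q
      = (pvAddM q.1 (me.filterMap pvParse1), q.2 + pvSumc (me.filterMap pvParse1)) := by
  induction me with
  | nil => intro q; simp [pvAddM, pvSumc]
  | cons r me ih =>
    intro q
    simp only [List.foldl_cons, List.filterMap_cons]
    cases h : PySem.Int.ofStr? (PySem.Str.replace r.1 "月" "") with
    | none => simp [pvParse1, h, ih]
    | some m =>
      have hp : pvParse1 r = some (m, r.2) := by simp [pvParse1, h]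
      simp only [hp]
      rw [ih]
      refine Prod.ext rfl ?_
      simp only [pvSumc, List.map_cons, List.sum_cons]
      ring

lemma pvInner2 (ml : List (List (String × Int))) :
    ∀ (q : PySem.Dict Int Int × Int),
      ml.foldl (fun q me =>
          me.foldl (fun q r =>
              match PySem.Int.ofStr? (PySem.Str.replace r.1 "月" "") with
              | some m => (q.1.modify m 0 (· + r.2), q.2 + r.2)
              | none => q) q) q
      = (pvAddM q.1 (pvTs ml), q.2 + pvSumc (pvTs ml)) := by
  induction ml with
  | nil => intro q; simp [pvTs, pvAddM, pvSumc]
  | cons me ml ih =>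
    intro q
    simp only [List.foldl_cons]
    rw [pvInner1, ih]
    simp only [pvTs, List.flatMap_cons]
    refine Prod.ext ?_ ?_
    · simp [pvAddM, List.foldl_append]
    · simp only [pvSumc, List.map_append, List.sum_append]
      ring

lemma pvAStepEq (st : PySem.Dict String Int × PySem.Dict Int Int)
    (p : String × List (List (String × Int))) :
    pvAStep st p = (st.1.insert p.1 (st.1.getD p.1 0 + pvSumc (pvTs p.2)), pvAddM st.2 (pvTs p.2)) := by
  simp only [pvAStep]
  rw [pvInner2]
  simp only [zero_add]
  rfl

lemma pvInsertNoop (d : PySem.Dict String Int) (k : String)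
    (hnd : d.keys.Nodup) (hc : d.contains k = true) :
    d.insert k (d.getD k 0) = d := by
  apply PySem.Dict.ext
  rw [PySem.Dict.items_insert_of_contains _ _ hc]
  conv_rhs => rw [← List.map_id d.items]
  apply List.map_congr_left
  intro p hp
  by_cases hk : p.1 = k
  · have hp' : (p.1, p.2) ∈ d.items := by simpa using hp
    have h2 : d.getD p.1 0 = p.2 := PySem.Dict.getD_of_mem_items _ hp' hnd 0
    subst hk
    simp [h2]
  · simp [hk]

lemma pvAddYTag (ts : List (Int × Int)) :
    ∀ (D : PySem.Dict String Int) (yl : String), D.keys.Nodup → D.contains yl = true →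
      pvAddY D (pvTag yl ts) = D.insert yl (D.getD yl 0 + pvSumc ts) := by
  induction ts with
  | nil =>
    intro D yl hnd hc
    simp only [pvTag, List.map_nil, pvAddY, List.foldl_nil, pvSumc, List.sum_nil, add_zero]
    exact (pvInsertNoop D yl hnd hc).symm
  | cons t ts ih =>
    intro D yl hnd hc
    simp only [pvTag, List.map_cons, pvAddY, List.foldl_cons]
    have := ih (D.insert yl (D.getD yl 0 + t.2)) yl
      (PySem.Dict.nodup_keys_insert _ _ _ hnd) (PySem.Dict.contains_insert_self _ _ _)
    simp only [pvTag, pvAddY] at this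
    rw [this, PySem.Dict.getD_insert_self, PySem.Dict.insert_insert_self]
    simp only [pvSumc, List.map_cons, List.sum_cons]
    ring_nf

lemma pvNodupSetdefault (D : PySem.Dict String Int) (l : String) (h : D.keys.Nodup) :
    (D.setdefault l 0).keys.Nodup := by
  cases hc : D.contains l with
  | true => rw [PySem.Dict.setdefault_of_contains _ _ hc]; exact h
  | false => rw [PySem.Dict.setdefault_of_not_contains _ _ hc]
             exact PySem.Dict.nodup_keys_insert _ _ _ h

lemma pvContainsSeed (L : List String) :
    ∀ (D : PySem.Dict String Int) (k : String), D.contains k = true →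
      (pvSeed D L).contains k = true := by
  induction L with
  | nil => intro D k h; exact h
  | cons l L ih =>
    intro D k h
    simp only [pvSeed, List.foldl_cons]
    exact ih _ _ (by rw [PySem.Dict.contains_setdefault]; simp [h])

lemma pvNodupSeed (L : List String) :
    ∀ (D : PySem.Dict String Int), D.keys.Nodup → (pvSeed D L).keys.Nodup := by
  induction L with
  | nil => intro D h; exact h
  | cons l L ih =>
    intro D h
    exact ih _ (pvNodupSetdefault D l h)

lemma pvGetDSeed (L : List String) :
    ∀ (D : PySem.Dict String Int) (k : String), D.contains k = true →
      (pvSeed D L).getD k 0 = D.getD k 0 := by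
  induction L with
  | nil => intro D k h; rfl
  | cons l L ih =>
    intro D k h
    have hc : (D.setdefault l 0).contains k = true := by
      rw [PySem.Dict.contains_setdefault]; simp [h]
    have hstep : pvSeed D (l :: L) = pvSeed (D.setdefault l 0) L := rfl
    rw [hstep, ih _ _ hc]
    by_cases hkl : k = l
    · subst hkl
      rw [PySem.Dict.setdefault_of_contains _ _ h]
    · rw [PySem.Dict.getD_eq_get?_getD, PySem.Dict.get?_setdefault_of_ne _ _ hkl,
        ← PySem.Dict.getD_eq_get?_getD]

lemma pvSwap (D : PySem.Dict String Int) (yl l : String) (v : Int)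
    (hc : D.contains yl = true) (hne : l ≠ yl) :
    (D.insert yl v).setdefault l 0 = (D.setdefault l 0).insert yl v := by
  cases hl : D.contains l with
  | true =>
    rw [PySem.Dict.setdefault_of_contains _ _ hl,
      PySem.Dict.setdefault_of_contains _ _ (by rw [PySem.Dict.contains_insert]; simp [hl])]
  | false =>
    rw [PySem.Dict.setdefault_of_not_contains _ _
        (by rw [PySem.Dict.contains_insert]; simp [hl, hne]),
      PySem.Dict.setdefault_of_not_contains _ _ hl]
    apply PySem.Dict.ext
    rw [PySem.Dict.items_insert_of_not_contains _ _
        (by rw [PySem.Dict.contains_insert]; simp [hl, hne]),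
      PySem.Dict.items_insert_of_contains _ _ hc,
      PySem.Dict.items_insert_of_contains _ _
        (by rw [PySem.Dict.contains_insert]; simp [hc]),
      PySem.Dict.items_insert_of_not_contains _ _ hl]
    rw [List.map_append]
    simp [hne]

lemma pvInsertSetdefault (D : PySem.Dict String Int) (yl : String) (v : Int) :
    D.insert yl v = (D.setdefault yl 0).insert yl v := by
  cases hc : D.contains yl with
  | true => rw [PySem.Dict.setdefault_of_contains _ _ hc]
  | false => rw [PySem.Dict.setdefault_of_not_contains _ _ hc, PySem.Dict.insert_insert_self]

lemma pvSeedInsert (L : List String) :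
    ∀ (D : PySem.Dict String Int) (yl : String) (v : Int),
      D.keys.Nodup → D.contains yl = true →
      pvSeed (D.insert yl v) L = (pvSeed D L).insert yl v := by
  induction L with
  | nil => intro D yl v _ _; rfl
  | cons l L ih =>
    intro D yl v hnd hc
    simp only [pvSeed, List.foldl_cons]
    by_cases hl : l = yl
    · subst hl
      rw [PySem.Dict.setdefault_of_contains _ _ (PySem.Dict.contains_insert_self _ _ _),
        PySem.Dict.setdefault_of_contains _ _ hc]
      exact ih D l v hnd hc
    · rw [pvSwap D yl l v hc hl]
      exact ih (D.setdefault l 0) yl v (pvNodupSetdefault D l hnd)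
        (by rw [PySem.Dict.contains_setdefault]; simp [hc])

lemma pvMain (P : List (String × List (List (String × Int)))) :
    ∀ (Y : PySem.Dict String Int) (M : PySem.Dict Int Int), Y.keys.Nodup →
      P.foldl pvAStep (Y, M)
      = (pvAddY (pvSeed Y (P.map (·.1))) (P.flatMap (fun p => pvTag p.1 (pvTs p.2))),
         pvAddM M (P.flatMap (fun p => pvTs p.2))) := by
  induction P with
  | nil => intro Y M hnd; simp [pvSeed, pvAddY, pvAddM]
  | cons p P ih =>
    intro Y M hnd
    simp only [List.foldl_cons, pvAStepEq]
    rw [ih _ _ (PySem.Dict.nodup_keys_insert _ _ _ hnd)]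
    have hcsd : (Y.setdefault p.1 0).contains p.1 = true := by
      rw [PySem.Dict.contains_setdefault]; simp
    have hndS : (pvSeed (Y.setdefault p.1 0) (P.map (·.1))).keys.Nodup :=
      pvNodupSeed _ _ (pvNodupSetdefault Y p.1 hnd)
    have hcS : (pvSeed (Y.setdefault p.1 0) (P.map (·.1))).contains p.1 = true :=
      pvContainsSeed _ _ _ hcsd
    refine Prod.ext ?_ ?_
    · simp only [List.map_cons, List.flatMap_cons]
      have h1 : pvSeed Y (p.1 :: P.map (·.1)) = pvSeed (Y.setdefault p.1 0) (P.map (·.1)) := rfl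
      rw [h1]
      have h2 : ∀ (D : PySem.Dict String Int) (a b : List (String × Int × Int)),
          pvAddY D (a ++ b) = pvAddY (pvAddY D a) b := by
        intro D a b; simp [pvAddY, List.foldl_append]
      rw [h2, pvAddYTag _ _ _ hndS hcS]
      have h3 : (pvSeed (Y.setdefault p.1 0) (P.map (·.1))).getD p.1 0 = Y.getD p.1 0 := by
        rw [pvGetDSeed _ _ _ hcsd, PySem.Dict.getD_setdefault_self]
      rw [h3]
      rw [pvInsertSetdefault Y p.1, pvSeedInsert _ _ _ _ (pvNodupSetdefault Y p.1 hnd) hcsd]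
    · simp only [List.flatMap_cons]
      simp [pvAddM, List.foldl_append]

lemma pvBTrip1 (yl : String) (me : List (String × Int)) :
    ∀ (ts0 : List (String × Int × Int)),
      me.foldl (fun ts r =>
          match PySem.Int.ofStr? (PySem.Str.replace r.1 "月" "") with
          | some m => ts ++ [(yl, (m, r.2))]
          | none => ts) ts0
      = ts0 ++ pvTag yl (me.filterMap pvParse1) := by
  induction me with
  | nil => intro ts0; simp [pvTag]
  | cons r me ih =>
    intro ts0
    simp only [List.foldl_cons, List.filterMap_cons]
    cases h : PySem.Int.ofStr? (PySem.Str.replace r.1 "月" "") with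
    | none => simp [pvParse1, h, ih]
    | some m =>
      have hp : pvParse1 r = some (m, r.2) := by simp [pvParse1, h]
      simp only [hp]
      rw [ih]
      simp [pvTag]

lemma pvBTrip2 (yl : String) (ml : List (List (String × Int))) :
    ∀ (ts0 : List (String × Int × Int)),
      ml.foldl (fun ts me =>
          me.foldl (fun ts r =>
              match PySem.Int.ofStr? (PySem.Str.replace r.1 "月" "") with
              | some m => ts ++ [(yl, (m, r.2))]
              | none => ts) ts) ts0
      = ts0 ++ pvTag yl (pvTs ml) := by
  induction ml with
  | nil => intro ts0; simp [pvTs, pvTag]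
  | cons me ml ih =>
    intro ts0
    simp only [List.foldl_cons]
    rw [pvBTrip1, ih]
    simp [pvTs, pvTag]

lemma pvBAcc (bl : List (List (String × List (List (String × Int))))) :
    ∀ (a : List String × List (String × Int × Int)),
      bl.foldl (fun acc year_map =>
          year_map.foldl (fun acc p =>
              let triples := p.2.foldl (fun ts me =>
                  me.foldl (fun ts r =>
                      match PySem.Int.ofStr? (PySem.Str.replace r.1 "月" "") with
                      | some m => ts ++ [(p.1, (m, r.2))]
                      | none => ts) ts) acc.2
              (acc.1 ++ [p.1], triples)) acc) a
      = (a.1 ++ bl.flatten.map (·.1),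
         a.2 ++ bl.flatten.flatMap (fun p => pvTag p.1 (pvTs p.2))) := by
  have inner : ∀ (ym : List (String × List (List (String × Int)))) (a : List String × List (String × Int × Int)),
      ym.foldl (fun acc p =>
          let triples := p.2.foldl (fun ts me =>
              me.foldl (fun ts r =>
                  match PySem.Int.ofStr? (PySem.Str.replace r.1 "月" "") with
                  | some m => ts ++ [(p.1, (m, r.2))]
                  | none => ts) ts) acc.2
          (acc.1 ++ [p.1], triples)) a
      = (a.1 ++ ym.map (·.1), a.2 ++ ym.flatMap (fun p => pvTag p.1 (pvTs p.2))) := by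
    intro ym
    induction ym with
    | nil => intro a; simp
    | cons p ym ih =>
      intro a
      simp only [List.foldl_cons]
      rw [pvBTrip2]
      rw [ih]
      simp
  induction bl with
  | nil => intro a; simp
  | cons ym bl ih =>
    intro a
    simp only [List.foldl_cons]
    rw [inner, ih]
    simp

lemma pvTaggedProj (bl : List (List (String × List (List (String × Int))))) :
    (bl.flatten.flatMap (fun p => pvTag p.1 (pvTs p.2))).map (·.2)
      = bl.flatten.flatMap (fun p => pvTs p.2) := by
  simp [pvTag, List.map_flatMap, List.map_map, Function.comp_def]

lemma pvBMonths (tagged : List (String × Int × Int)) :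
    tagged.foldl (fun d t => d.insert t.2.1 (d.getD t.2.1 0 + t.2.2))
        (PySem.Dict.empty : PySem.Dict Int Int)
      = pvAddM PySem.Dict.empty (tagged.map (·.2)) := by
  simp [pvAddM, List.foldl_map]

-- ===== VERDICT (by name: the statement is the Claim_ definition above) =====
theorem parse_birthday_data_py_spec : Claim_equal_parse_birthday_data_py := by
  intro bl _
  unfold Spec_parse_birthday_data_py
  have hA : parse_birthday_data_py bl
      = (let st := bl.flatten.foldl pvAStep
            ((PySem.Dict.empty : PySem.Dict String Int), (PySem.Dict.empty : PySem.Dict Int Int))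
         (st.1.items, st.2.items)) := by
    simp only [parse_birthday_data_py]
    rw [← List.foldl_flatten]
    rfl
  rw [hA]
  rw [pvMain bl.flatten PySem.Dict.empty PySem.Dict.empty (by rw [PySem.Dict.keys_empty]; exact List.nodup_nil)]
  simp only [parse_birthday_data_py_alt]
  rw [pvBAcc bl ([], [])]
  simp only [List.nil_append]
  rw [pvBMonths, pvTaggedProj]
  rfl
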